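-- pv_equiv track=rewrite | github.com/walkccc/LeetCode | solutions/2340. Minimum Adjacent Swaps to Make a Valid Array/2340.py | _getRightmostMaxIndex
-- ===== SOURCE A (Python) =====
-- from typing import List
--
-- def _getRightmostMaxIndex(nums: List[int]) -> int:
--   max = nums[-1]
--   maxIndex = len(nums) - 1
--   for i in range(len(nums) - 2, -1, -1):
--     if nums[i] > max:
--       max = nums[i]
--       maxIndex = i
--   return maxIndex
-- ===== SOURCE B (Python) =====
-- from typing import List
--
-- def _getRightmostMaxIndex(nums: List[int]) -> int:
--   # pass 1: find the maximum value
--   m = nums[0]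
--   for x in nums:
--     if x > m:
--       m = x
--   # pass 2: first index from the right holding it
--   for i in range(len(nums) - 1, -1, -1):
--     if nums[i] == m:
--       return i
-- ===== Notes on version B (the rewrite author's own statement) =====
-- stated objective: alternative
-- what changed: Replaced A's single right-to-left fused scan tracking (max, index) by two sequential passes: one loop computing the maximum value, then a separate right-to-left loop returning the first index equal to it.
import Mathlib
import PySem

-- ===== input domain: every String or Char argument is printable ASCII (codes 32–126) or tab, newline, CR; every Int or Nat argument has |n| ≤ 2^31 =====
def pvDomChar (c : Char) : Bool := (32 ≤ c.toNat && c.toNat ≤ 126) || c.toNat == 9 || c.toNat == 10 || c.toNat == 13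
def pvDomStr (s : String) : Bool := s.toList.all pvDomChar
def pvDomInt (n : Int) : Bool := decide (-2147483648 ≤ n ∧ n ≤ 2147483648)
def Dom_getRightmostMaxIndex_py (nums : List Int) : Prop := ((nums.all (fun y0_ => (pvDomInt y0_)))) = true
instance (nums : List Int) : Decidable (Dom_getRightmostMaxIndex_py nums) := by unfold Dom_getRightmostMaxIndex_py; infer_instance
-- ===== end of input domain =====

-- B replaces A's single fused right-to-left scan tracking (max, index) by two separate
-- passes: one loop computing the maximum value, then a right-to-left search for the
-- first index holding it (objective: alternative decomposition, same cost).


-- ===== PORT A =====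
-- max = nums[-1]; maxIndex = len(nums)-1; for i in range(len(nums)-2,-1,-1): if nums[i]>max: update; return maxIndex
def getRightmostMaxIndex_py (nums : List Int) : Int :=
  ((PySem.List.pyRange ((nums.length : Int) - 2) (-1) (-1)).foldl
      (fun (st : Int × Int) i =>
        if PySem.List.pyGetD nums i 0 > st.1 then (PySem.List.pyGetD nums i 0, i) else st)
      (PySem.List.pyGetD nums (-1) 0, (nums.length : Int) - 1)).2

-- ===== PORT B =====
-- B's second loop ('for i in range(len(nums)-1,-1,-1): if nums[i] == m: return i') as a
-- recursion over the index list; the [] case is unreachable since m occurs in nums.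
def findFromRight (nums : List Int) (m : Int) : List Int → Int
  | [] => -1
  | i :: rest => if PySem.List.pyGetD nums i 0 = m then i else findFromRight nums m rest

def getRightmostMaxIndex_py_alt (nums : List Int) : Int :=
  findFromRight nums
    (nums.foldl (fun acc x => if x > acc then x else acc) (PySem.List.pyGetD nums 0 0))
    (PySem.List.pyRange ((nums.length : Int) - 1) (-1) (-1))

-- ===== PRECONDITION & SPEC =====
-- A raises IndexError on the empty list (nums[-1]); Pre_ excludes exactly that input.
def Pre_getRightmostMaxIndex_py (nums : List Int) : Prop := nums ≠ []
instance (nums : List Int) : Decidable (Pre_getRightmostMaxIndex_py nums) := by unfold Pre_getRightmostMaxIndex_py; infer_instance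

def pvWitness_getRightmostMaxIndex_py : List Int := [3, 1, 3, 2]

def Spec_getRightmostMaxIndex_py (nums : List Int) (out : Int) : Prop := out = getRightmostMaxIndex_py_alt nums
instance (nums : List Int) (out : Int) : Decidable (Spec_getRightmostMaxIndex_py nums out) := by unfold Spec_getRightmostMaxIndex_py; infer_instance

-- ===== CLAIM (what is proved, stated in full; the proofs are below) =====
def Claim_equal_getRightmostMaxIndex_py : Prop := ∀ (nums : List Int), Dom_getRightmostMaxIndex_py nums → Pre_getRightmostMaxIndex_py nums → Spec_getRightmostMaxIndex_py nums (getRightmostMaxIndex_py nums)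

-- ===== LEMMAS AND PROOFS =====

-- A's loop from state (m, ↑idx) with the invariant "nums[idx] = m, everything at or
-- beyond k is ≤ m, everything right of idx is < m" ends in a state naming a genuine
-- rightmost maximum of the whole list.
theorem loopA_inv (nums : List Int) : ∀ (k : Nat), k ≤ nums.length → ∀ (m : Int) (idx : Nat),
    idx < nums.length → nums.getD idx 0 = m →
    (∀ j, k ≤ j → j < nums.length → nums.getD j 0 ≤ m) →
    (∀ j, idx < j → j < nums.length → nums.getD j 0 < m) →
    ∃ idx' : Nat,
      (PySem.List.pyRange ((k : Int) - 1) (-1) (-1)).foldl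
        (fun (st : Int × Int) i =>
          if PySem.List.pyGetD nums i 0 > st.1 then (PySem.List.pyGetD nums i 0, i) else st)
        (m, (idx : Int))
      = (nums.getD idx' 0, (idx' : Int)) ∧
      idx' < nums.length ∧
      (∀ j, j < nums.length → nums.getD j 0 ≤ nums.getD idx' 0) ∧
      (∀ j, idx' < j → j < nums.length → nums.getD j 0 < nums.getD idx' 0) := by
  intro k
  induction k with
  | zero =>
    intro _ m idx hidx hm h3 _h4
    rw [PySem.List.pyRange_neg_one_eq_nil (by omega)]
    exact ⟨idx, by rw [List.foldl_nil, hm], hidx, fun j hj => hm ▸ h3 j (Nat.zero_le j) hj,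
      fun j hj hj' => hm ▸ _h4 j hj hj'⟩
  | succ k ih =>
    intro hk m idx hidx hm h3 h4
    have hcast : ((k + 1 : Nat) : Int) - 1 = (k : Int) := by push_cast; ring
    rw [hcast, PySem.List.pyRange_neg_one_cons (by omega), List.foldl_cons]
    have hget : PySem.List.pyGetD nums (k : Int) 0 = nums.getD k 0 :=
      PySem.List.pyGetD_natCast nums k 0
    by_cases hlt : nums.getD k 0 > m
    · -- update: new state (nums[k], k)
      have hstep : (if PySem.List.pyGetD nums (k : Int) 0 > (m, (idx : Int)).1 then
          (PySem.List.pyGetD nums (k : Int) 0, (k : Int)) else (m, (idx : Int)))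
          = (nums.getD k 0, ((k : Nat) : Int)) := by
        rw [hget]; split_ifs with h
        · rfl
        · exact absurd hlt h
      rw [hstep]
      exact ih (by omega) (nums.getD k 0) k (by omega) rfl
        (fun j hj hj' => by
          rcases Nat.eq_or_lt_of_le hj with h | h
          · exact h ▸ le_refl _
          · exact le_of_lt (lt_of_le_of_lt (h3 j (by omega) hj') hlt))
        (fun j hj hj' => lt_of_le_of_lt (h3 j (by omega) hj') hlt)
    · -- keep state
      have hstep : (if PySem.List.pyGetD nums (k : Int) 0 > (m, (idx : Int)).1 then
          (PySem.List.pyGetD nums (k : Int) 0, (k : Int)) else (m, (idx : Int)))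
          = (m, (idx : Int)) := by
        rw [hget]; split_ifs with h
        · exact absurd h hlt
        · rfl
      rw [hstep]
      exact ih (by omega) m idx hidx hm
        (fun j hj hj' => by
          rcases Nat.eq_or_lt_of_le hj with h | h
          · exact h ▸ le_of_not_gt hlt
          · exact h3 j (by omega) hj')
        h4

-- The right-to-left search returns idx when nums[idx] = M and everything strictly
-- right of idx (below k) is < M.
theorem find_spec (nums : List Int) : ∀ (k : Nat) (M : Int) (idx : Nat),
    idx < k →
    nums.getD idx 0 = M →
    (∀ j, idx < j → j < k → nums.getD j 0 < M) →
    findFromRight nums M (PySem.List.pyRange ((k : Int) - 1) (-1) (-1)) = (idx : Int) := by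
  intro k
  induction k with
  | zero => intro M idx h; omega
  | succ k ih =>
    intro M idx hidx hm h4
    have hcast : ((k + 1 : Nat) : Int) - 1 = (k : Int) := by push_cast; ring
    rw [hcast, PySem.List.pyRange_neg_one_cons (by omega)]
    have hget : PySem.List.pyGetD nums (k : Int) 0 = nums.getD k 0 :=
      PySem.List.pyGetD_natCast nums k 0
    rcases Nat.eq_or_lt_of_le (Nat.lt_succ_iff.mp hidx) with h | h
    · subst h
      simp only [findFromRight, hget]
      rw [if_pos hm]
    · have hne : nums.getD k 0 ≠ M := ne_of_lt (h4 k h (Nat.lt_succ_self k))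
      simp only [findFromRight, hget]
      rw [if_neg hne]
      exact ih M idx h hm (fun j hj hj' => h4 j hj (by omega))

-- B's first pass computes exactly 'foldl max'.
theorem foldB_eq_max (l : List Int) (a : Int) :
    l.foldl (fun acc x => if x > acc then x else acc) a = l.foldl max a := by
  have : (fun (acc x : Int) => if x > acc then x else acc) = max := by
    funext acc x; simp [max_def]; split_ifs <;> omega
  rw [this]

-- foldl max is ≤ any upper bound of the seed and the elements.
theorem foldl_max_le (l : List Int) : ∀ (a M : Int), a ≤ M → (∀ x ∈ l, x ≤ M) →
    l.foldl max a ≤ M := by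
  induction l with
  | nil => intro a M h _; simpa using h
  | cons y ys ih =>
    intro a M h hall
    exact ih _ M (max_le h (hall y List.mem_cons_self)) (fun x hx => hall x (List.mem_cons_of_mem y hx))

-- ===== VERDICT (by name: the statement is the Claim_ definition above) =====
theorem getRightmostMaxIndex_py_spec : Claim_equal_getRightmostMaxIndex_py := by
  intro nums _ hpre
  unfold Spec_getRightmostMaxIndex_py
  have hn : 0 < nums.length := List.length_pos_iff.mpr hpre
  have hlast : PySem.List.pyGetD nums (-1) 0 = nums.getD (nums.length - 1) 0 := by
    rw [PySem.List.pyGetD_neg_one nums 0 hpre, List.getLast_eq_getElem,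
      List.getD_eq_getElem nums 0 (by omega)]
  obtain ⟨idx', hfold, hidx', hub, hstrict⟩ :=
    loopA_inv nums (nums.length - 1) (by omega) (nums.getD (nums.length - 1) 0)
      (nums.length - 1) (by omega) rfl
      (fun j hj hj' => by rw [show j = nums.length - 1 by omega])
      (fun j hj hj' => absurd hj' (by omega))
  have hcast1 : ((nums.length - 1 : Nat) : Int) - 1 = (nums.length : Int) - 2 := by omega
  have hcast2 : ((nums.length - 1 : Nat) : Int) = (nums.length : Int) - 1 := by omega
  have hA : getRightmostMaxIndex_py nums = (idx' : Int) := by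
    unfold getRightmostMaxIndex_py
    rw [hlast, ← hcast2, ← hcast1, hfold]
  have hmem : ∀ x ∈ nums, x ≤ nums.getD idx' 0 := by
    intro x hx
    obtain ⟨j, hj, hje⟩ := List.getElem_of_mem hx
    have := hub j hj
    rwa [List.getD_eq_getElem nums 0 hj, hje] at this
  have hattain : nums.getD idx' 0 ∈ nums := by
    rw [List.getD_eq_getElem nums 0 hidx']
    exact List.getElem_mem hidx'
  have hM : nums.foldl max (PySem.List.pyGetD nums 0 0) = nums.getD idx' 0 := by
    apply le_antisymm
    · apply foldl_max_le
      · rw [PySem.List.pyGetD_zero, List.getD_eq_getElem nums 0 hn]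
        exact hmem _ (List.getElem_mem hn)
      · exact hmem
    · exact (PySem.List.le_foldl_max nums (PySem.List.pyGetD nums 0 0)).2 _ hattain
  have hB : getRightmostMaxIndex_py_alt nums = (idx' : Int) := by
    unfold getRightmostMaxIndex_py_alt
    rw [foldB_eq_max, hM]
    exact find_spec nums nums.length (nums.getD idx' 0) idx' hidx' rfl hstrict
  rw [hA, hB]
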